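-- pv_equiv track=rewrite | github.com/harrywu666/ccad | cad-review-backend/services/audit_runtime/runner_observer_feed.py | _build_risk_summary
-- ===== SOURCE A (Python) =====
-- from collections import Counter
-- from typing import Any, Dict, List
--
-- def _output_unstable_streak(recent_events: List[Dict[str, Any]]) -> int:
--     streak = 0
--     for event in reversed(recent_events):
--         event_kind = str(event.get("event_kind") or "").strip()
--         if event_kind == "output_validation_failed":
--             streak += 1
--             continue
--         if event_kind in {"runner_broadcast", "provider_stream_delta", "runner_observer_decision"}:
--             continue
--         break
--     return streak
--
-- def _build_risk_summary(recent_events: List[Dict[str, Any]]) -> Dict[str, Any]: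
--     counter = Counter(str(event.get("event_kind") or "").strip() for event in recent_events)
--     return {
--         "output_validation_failed_count": counter.get("output_validation_failed", 0),
--         "output_repair_succeeded_count": counter.get("output_repair_succeeded", 0),
--         "runner_turn_retrying_count": counter.get("runner_turn_retrying", 0),
--         "runner_turn_deferred_count": counter.get("runner_turn_deferred", 0)
--         + counter.get("runner_turn_needs_review", 0),
--         "agent_status_reported_count": counter.get("agent_status_reported", 0),
--         "agent_help_requested_count": counter.get("runner_help_requested", 0),
--         "agent_help_resolved_count": counter.get("runner_help_resolved", 0),
--         "output_unstable_streak": _output_unstable_streak(recent_events),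
--         "master_replan_requested_count": counter.get("master_replan_requested", 0),
--     }
-- ===== SOURCE B (Python) =====
-- def _build_risk_summary(recent_events):
--     vf = rs = rt = dn = sr = hq = hr = rp = 0
--     streak = 0
--     for event in recent_events:
--         kind = str(event.get("event_kind") or "").strip()
--         if kind == "output_validation_failed":
--             vf += 1
--             streak += 1
--         else:
--             if kind == "output_repair_succeeded":
--                 rs += 1
--             elif kind == "runner_turn_retrying":
--                 rt += 1
--             elif kind in ("runner_turn_deferred", "runner_turn_needs_review"):
--                 dn += 1
--             elif kind == "agent_status_reported":
--                 sr += 1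
--             elif kind == "runner_help_requested":
--                 hq += 1
--             elif kind == "runner_help_resolved":
--                 hr += 1
--             elif kind == "master_replan_requested":
--                 rp += 1
--             if kind not in ("runner_broadcast", "provider_stream_delta", "runner_observer_decision"):
--                 streak = 0
--     return {
--         "output_validation_failed_count": vf,
--         "output_repair_succeeded_count": rs,
--         "runner_turn_retrying_count": rt,
--         "runner_turn_deferred_count": dn,
--         "agent_status_reported_count": sr,
--         "agent_help_requested_count": hq,
--         "agent_help_resolved_count": hr,
--         "output_unstable_streak": streak,
--         "master_replan_requested_count": rp,
--     }
-- ===== Notes on version B (the rewrite author's own statement) =====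
-- stated objective: alternative
-- what changed: Replaced Counter-plus-reversed-scan (two passes) by one forward pass that maintains plain integer counters and a running streak that resets on non-neutral, non-failure kinds, so the reversed trailing-streak scan disappears.
import Mathlib
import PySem

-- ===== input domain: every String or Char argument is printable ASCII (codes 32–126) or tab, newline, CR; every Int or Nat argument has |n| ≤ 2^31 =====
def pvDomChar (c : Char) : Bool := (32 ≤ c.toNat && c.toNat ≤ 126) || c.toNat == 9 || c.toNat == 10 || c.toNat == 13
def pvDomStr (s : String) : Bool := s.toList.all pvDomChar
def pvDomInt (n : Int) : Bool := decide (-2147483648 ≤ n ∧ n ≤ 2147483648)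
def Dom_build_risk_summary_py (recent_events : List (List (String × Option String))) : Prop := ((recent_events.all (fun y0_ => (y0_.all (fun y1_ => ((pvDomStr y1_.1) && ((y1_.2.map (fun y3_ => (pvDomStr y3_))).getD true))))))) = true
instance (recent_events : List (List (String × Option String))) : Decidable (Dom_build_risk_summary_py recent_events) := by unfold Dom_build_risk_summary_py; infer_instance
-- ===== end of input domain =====

-- B replaces A's Counter + reversed trailing-streak scan by one forward pass with plain
-- counters and a running streak (alternative decomposition; same O(n) cost).

-- ===== PORT A =====

-- str(event.get("event_kind") or "").strip()
def pvKindOf (event : List (String × Option String)) : String :=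
  PySem.Str.strip (match (PySem.Dict.mk event).get? "event_kind" with
    | some (some s) => if s = "" then "" else s
    | _ => "")

-- the reversed-scan loop of _output_unstable_streak (break ⇒ stop, neutral kinds ⇒ continue)
def pvStreakLoop : List (List (String × Option String)) → Int
  | [] => 0
  | event :: rest =>
    let event_kind := pvKindOf event
    if event_kind = "output_validation_failed" then pvStreakLoop rest + 1
    else if event_kind = "runner_broadcast" ∨ event_kind = "provider_stream_delta" ∨
            event_kind = "runner_observer_decision" then pvStreakLoop rest
    else 0

def output_unstable_streak_py (recent_events : List (List (String × Option String))) : Int :=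
  pvStreakLoop recent_events.reverse

def build_risk_summary_py (recent_events : List (List (String × Option String))) : List (String × Int) :=
  let counter := PySem.Dict.counter (recent_events.map pvKindOf)
  [("output_validation_failed_count", counter.getD "output_validation_failed" 0),
   ("output_repair_succeeded_count", counter.getD "output_repair_succeeded" 0),
   ("runner_turn_retrying_count", counter.getD "runner_turn_retrying" 0),
   ("runner_turn_deferred_count", counter.getD "runner_turn_deferred" 0
      + counter.getD "runner_turn_needs_review" 0),
   ("agent_status_reported_count", counter.getD "agent_status_reported" 0),
   ("agent_help_requested_count", counter.getD "runner_help_requested" 0),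
   ("agent_help_resolved_count", counter.getD "runner_help_resolved" 0),
   ("output_unstable_streak", output_unstable_streak_py recent_events),
   ("master_replan_requested_count", counter.getD "master_replan_requested" 0)]

-- ===== PORT B =====

structure PvSt where
  vf : Int
  rs : Int
  rt : Int
  dn : Int
  sr : Int
  hq : Int
  hr : Int
  rp : Int
  streak : Int
deriving Repr, DecidableEq

def pvStep (st : PvSt) (event : List (String × Option String)) : PvSt :=
  let kind := pvKindOf event
  if kind = "output_validation_failed" then
    { st with vf := st.vf + 1, streak := st.streak + 1 }
  else
    let st :=
      if kind = "output_repair_succeeded" then { st with rs := st.rs + 1 }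
      else if kind = "runner_turn_retrying" then { st with rt := st.rt + 1 }
      else if kind = "runner_turn_deferred" ∨ kind = "runner_turn_needs_review" then { st with dn := st.dn + 1 }
      else if kind = "agent_status_reported" then { st with sr := st.sr + 1 }
      else if kind = "runner_help_requested" then { st with hq := st.hq + 1 }
      else if kind = "runner_help_resolved" then { st with hr := st.hr + 1 }
      else if kind = "master_replan_requested" then { st with rp := st.rp + 1 }
      else st
    if ¬ (kind = "runner_broadcast" ∨ kind = "provider_stream_delta" ∨ kind = "runner_observer_decision")
    then { st with streak := 0 } else st

def build_risk_summary_py_alt (recent_events : List (List (String × Option String))) : List (String × Int) :=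
  let st := recent_events.foldl pvStep ⟨0, 0, 0, 0, 0, 0, 0, 0, 0⟩
  [("output_validation_failed_count", st.vf),
   ("output_repair_succeeded_count", st.rs),
   ("runner_turn_retrying_count", st.rt),
   ("runner_turn_deferred_count", st.dn),
   ("agent_status_reported_count", st.sr),
   ("agent_help_requested_count", st.hq),
   ("agent_help_resolved_count", st.hr),
   ("output_unstable_streak", st.streak),
   ("master_replan_requested_count", st.rp)]

-- ===== PRECONDITION & SPEC =====
def Spec_build_risk_summary_py (recent_events : List (List (String × Option String))) (out : List (String × Int)) : Prop := out = build_risk_summary_py_alt recent_events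
instance (recent_events : List (List (String × Option String))) (out : List (String × Int)) : Decidable (Spec_build_risk_summary_py recent_events out) := by unfold Spec_build_risk_summary_py; infer_instance

-- ===== CLAIM (what is proved, stated in full; the proofs are below) =====
def Claim_equal_build_risk_summary_py : Prop := ∀ (recent_events : List (List (String × Option String))), Dom_build_risk_summary_py recent_events → Spec_build_risk_summary_py recent_events (build_risk_summary_py recent_events)

-- ===== LEMMAS AND PROOFS =====

-- the state after folding xs, in closed form: kind-counts and the trailing streak
theorem pvFoldl_step (xs : List (List (String × Option String))) :
    xs.foldl pvStep ⟨0, 0, 0, 0, 0, 0, 0, 0, 0⟩ =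
      ⟨((xs.map pvKindOf).count "output_validation_failed" : Int),
       ((xs.map pvKindOf).count "output_repair_succeeded" : Int),
       ((xs.map pvKindOf).count "runner_turn_retrying" : Int),
       ((xs.map pvKindOf).count "runner_turn_deferred" : Int)
         + ((xs.map pvKindOf).count "runner_turn_needs_review" : Int),
       ((xs.map pvKindOf).count "agent_status_reported" : Int),
       ((xs.map pvKindOf).count "runner_help_requested" : Int),
       ((xs.map pvKindOf).count "runner_help_resolved" : Int),
       ((xs.map pvKindOf).count "master_replan_requested" : Int),
       pvStreakLoop xs.reverse⟩ := by
  induction xs using List.reverseRecOn with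
  | nil => simp [pvStreakLoop]
  | append_singleton ys e ih =>
    rw [List.foldl_append, ih]
    simp only [List.foldl_cons, List.foldl_nil, List.map_append, List.count_append,
      List.map_cons, List.map_nil, List.count_cons, List.count_nil,
      List.reverse_append, List.reverse_singleton, List.singleton_append, pvStreakLoop, pvStep]
    rcases eq_or_ne (pvKindOf e) "output_validation_failed" with h|n1
    · simp [h, pvStreakLoop] <;> omega
    rcases eq_or_ne (pvKindOf e) "output_repair_succeeded" with h|n2
    · simp [h, n1, pvStreakLoop] <;> omega
    rcases eq_or_ne (pvKindOf e) "runner_turn_retrying" with h|n3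
    · simp [h, n1, n2, pvStreakLoop] <;> omega
    rcases eq_or_ne (pvKindOf e) "runner_turn_deferred" with h|n4
    · simp [h, n1, n2, n3, pvStreakLoop] <;> omega
    rcases eq_or_ne (pvKindOf e) "runner_turn_needs_review" with h|n5
    · simp [h, n1, n2, n3, n4, pvStreakLoop] <;> omega
    rcases eq_or_ne (pvKindOf e) "agent_status_reported" with h|n6
    · simp [h, n1, n2, n3, n4, n5, pvStreakLoop] <;> omega
    rcases eq_or_ne (pvKindOf e) "runner_help_requested" with h|n7
    · simp [h, n1, n2, n3, n4, n5, n6, pvStreakLoop] <;> omega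
    rcases eq_or_ne (pvKindOf e) "runner_help_resolved" with h|n8
    · simp [h, n1, n2, n3, n4, n5, n6, n7, pvStreakLoop] <;> omega
    rcases eq_or_ne (pvKindOf e) "master_replan_requested" with h|n9
    · simp [h, n1, n2, n3, n4, n5, n6, n7, n8, pvStreakLoop] <;> omega
    rcases eq_or_ne (pvKindOf e) "runner_broadcast" with h|n10
    · simp [h, n1, n2, n3, n4, n5, n6, n7, n8, n9, pvStreakLoop]
    rcases eq_or_ne (pvKindOf e) "provider_stream_delta" with h|n11
    · simp [h, n1, n2, n3, n4, n5, n6, n7, n8, n9, n10, pvStreakLoop]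
    rcases eq_or_ne (pvKindOf e) "runner_observer_decision" with h|n12
    · simp [h, n1, n2, n3, n4, n5, n6, n7, n8, n9, n10, n11, pvStreakLoop]
    · simp [n1, n2, n3, n4, n5, n6, n7, n8, n9, n10, n11, n12, pvStreakLoop]

-- ===== VERDICT (by name: the statement is the Claim_ definition above) =====
theorem build_risk_summary_py_spec : Claim_equal_build_risk_summary_py := by
  intro recent_events _
  unfold Spec_build_risk_summary_py build_risk_summary_py build_risk_summary_py_alt
    output_unstable_streak_py
  rw [pvFoldl_step]
  simp [PySem.Dict.getD_counter]
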